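-- pv_equiv track=rewrite | github.com/eliottcassidy2000/math | 04-computation/discriminant_real_roots.py | compute_independence_poly
-- ===== SOURCE A (Python) =====
-- def compute_independence_poly(cycles):
--     """Compute I(Omega, x) coefficients: alpha_k = #{independent sets of size k}.
--     Omega has cycles as vertices, edges between cycles sharing a vertex.
--     Independent sets = collections of pairwise vertex-disjoint cycles."""
--     m = len(cycles)
--     if m == 0:
--         return [1]  # I = 1
--
--     # Build adjacency (conflict): cycles[i] and cycles[j] conflict if they share a vertex
--     conflict = [[False]*m for _ in range(m)]
--     for i in range(m):
--         for j in range(i+1, m):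
--             if cycles[i] & cycles[j]:  # shared vertex
--                 conflict[i][j] = conflict[j][i] = True
--
--     # Count independent sets by size using inclusion
--     # For small alpha (<=3), we can enumerate efficiently
--     alpha_0 = 1
--     alpha_1 = m
--
--     # alpha_2: pairs of non-conflicting cycles
--     alpha_2 = 0
--     for i in range(m):
--         for j in range(i+1, m):
--             if not conflict[i][j]:
--                 alpha_2 += 1
--
--     # alpha_3: triples of pairwise non-conflicting cycles
--     alpha_3 = 0
--     for i in range(m):
--         for j in range(i+1, m):
--             if conflict[i][j]:
--                 continue
--             for k in range(j+1, m):
--                 if not conflict[i][k] and not conflict[j][k]: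
--                     alpha_3 += 1
--
--     coeffs = [1, alpha_1, alpha_2, alpha_3]
--     # Trim trailing zeros
--     while len(coeffs) > 1 and coeffs[-1] == 0:
--         coeffs.pop()
--     return coeffs
-- ===== SOURCE B (Python) =====
-- def compute_independence_poly(cycles):
--     """Same coefficients as A, but via inclusion-exclusion on edge/degree/triangle
--     counts of the conflict graph instead of enumerating all index triples."""
--     m = len(cycles)
--     if m == 0:
--         return [1]
--     # ascending lists of conflicting partners j > i (half the pair tests A makes)
--     upper = [[j for j in range(i + 1, m) if not cycles[i].isdisjoint(cycles[j])]
--              for i in range(m)]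
--     lowdeg = [0] * m
--     for u in upper:
--         for j in u:
--             lowdeg[j] += 1
--     degs = [len(upper[i]) + lowdeg[i] for i in range(m)]
--     E = sum(len(u) for u in upper)
--     P2 = sum(d * (d - 1) // 2 for d in degs)
--     T = 0
--     for i in range(m):
--         ui = set(upper[i])
--         for j in upper[i]:
--             T += len([k for k in upper[j] if k in ui])
--     alpha_2 = m * (m - 1) // 2 - E
--     alpha_3 = m * (m - 1) * (m - 2) // 6 - E * (m - 2) + P2 - T
--     if alpha_3 != 0:
--         return [1, m, alpha_2, alpha_3]
--     if alpha_2 != 0: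
--         return [1, m, alpha_2]
--     return [1, m]
-- ===== Notes on version B (the rewrite author's own statement) =====
-- stated objective: faster
-- what changed: Replaces A's full m*m conflict matrix and O(m^3) enumeration of all index triples by inclusion-exclusion: alpha_2 = C(m,2) - E and alpha_3 = C(m,3) - E*(m-2) + sum_v C(deg_v,2) - T, computed from half-matrix neighbor lists, degree counts and an edge-based triangle count with constant-time membership.
import Mathlib
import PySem

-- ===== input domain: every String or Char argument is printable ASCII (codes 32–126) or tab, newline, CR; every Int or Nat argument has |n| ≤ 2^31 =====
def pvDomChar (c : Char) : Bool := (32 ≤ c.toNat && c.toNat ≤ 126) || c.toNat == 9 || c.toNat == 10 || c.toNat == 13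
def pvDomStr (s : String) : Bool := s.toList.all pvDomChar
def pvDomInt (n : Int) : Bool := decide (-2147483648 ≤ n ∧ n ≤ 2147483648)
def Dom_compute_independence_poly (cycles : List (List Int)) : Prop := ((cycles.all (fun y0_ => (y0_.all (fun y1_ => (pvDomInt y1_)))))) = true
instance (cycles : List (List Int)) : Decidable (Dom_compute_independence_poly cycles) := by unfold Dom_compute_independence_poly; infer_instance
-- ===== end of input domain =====

-- B replaces A's O(m^3) triple enumeration by inclusion-exclusion over edge/degree/triangle
-- counts of the conflict graph; the equivalence below is exact on every input.

-- ===== PORT A =====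

-- truthiness of Python's `cycles[i] & cycles[j]` (nonempty set intersection); the same
-- subexpression occurs in both Pythons, so both ports use this helper
def pvShares (a b : List Int) : Bool := !(PySem.Set.inter a b).isEmpty

-- conflict[i][j] read; every use in A has 0 ≤ i, j < m (in-range Python indexing)
def pvMget (conf : List (List Bool)) (i j : Int) : Bool :=
  PySem.List.pyGetD (PySem.List.pyGetD conf i []) j false

-- conflict[i][j] = True; every call in A has 0 ≤ i, j < m, so .toNat is exact
def pvSetT (conf : List (List Bool)) (i j : Int) : List (List Bool) :=
  conf.modify i.toNat (fun row => row.set j.toNat true)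

-- A's trailing-zero trim loop (while len(coeffs) > 1 and coeffs[-1] == 0: coeffs.pop())
def pvTrim (cs : List Int) : List Int :=
  if cs.length > 1 ∧ cs.getLast? = some 0 then pvTrim cs.dropLast else cs
termination_by cs.length
decreasing_by simp [List.length_dropLast]; omega

-- conflict = [[False]*m ...] then the nested marking loops of A
def pvConflict (cycles : List (List Int)) (m : Int) : List (List Bool) :=
  (PySem.List.pyRange 0 m).foldl (fun conf i =>
    (PySem.List.pyRange (i+1) m).foldl (fun conf j =>
      if pvShares (PySem.List.pyGetD cycles i []) (PySem.List.pyGetD cycles j []) then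
        pvSetT (pvSetT conf i j) j i
      else conf) conf)
    ((PySem.List.pyRange 0 m).map (fun _ => List.replicate m.toNat false))

def compute_independence_poly (cycles : List (List Int)) : List Int :=
  let m : Int := (cycles.length : Int)
  if m == 0 then [1] else
  let conflict := pvConflict cycles m
  let alpha_1 := m
  let alpha_2 :=
    (PySem.List.pyRange 0 m).foldl (fun a i =>
      (PySem.List.pyRange (i+1) m).foldl (fun a j =>
        if !(pvMget conflict i j) then a + 1 else a) a) (0 : Int)
  let alpha_3 :=
    (PySem.List.pyRange 0 m).foldl (fun a i =>
      (PySem.List.pyRange (i+1) m).foldl (fun a j =>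
        if pvMget conflict i j then a
        else (PySem.List.pyRange (j+1) m).foldl (fun a k =>
          if !(pvMget conflict i k) && !(pvMget conflict j k) then a + 1 else a) a) a) (0 : Int)
  pvTrim [1, alpha_1, alpha_2, alpha_3]

-- ===== PORT B =====

-- truthiness of Python's `not cycles[i].isdisjoint(cycles[j])` in B's comprehension
def pvSharesD (a b : List Int) : Bool := !(PySem.Set.isdisjoint a b)

-- upper = [[j for j in range(i+1, m) if not cycles[i].isdisjoint(cycles[j])] for i in range(m)]
def pvUpper (cycles : List (List Int)) (m : Int) : List (List Int) :=
  (PySem.List.pyRange 0 m).map (fun i =>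
    (PySem.List.pyRange (i+1) m).filter (fun j =>
      pvSharesD (PySem.List.pyGetD cycles i []) (PySem.List.pyGetD cycles j [])))

def compute_independence_poly_alt (cycles : List (List Int)) : List Int :=
  let m : Int := (cycles.length : Int)
  if m == 0 then [1] else
  let upper := pvUpper cycles m
  -- lowdeg = [0]*m; for u in upper: for j in u: lowdeg[j] += 1   (j is always in [0,m))
  let lowdeg := upper.foldl (fun ld u =>
    u.foldl (fun ld j => ld.modify j.toNat (fun c => c + 1)) ld)
    (List.replicate m.toNat (0 : Int))
  let degs : List Int := (PySem.List.pyRange 0 m).map (fun i =>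
    ((PySem.List.pyGetD upper i []).length : Int) + PySem.List.pyGetD lowdeg i 0)
  let E := (upper.map (fun u => (u.length : Int))).sum
  let P2 := (degs.map (fun d => PySem.Int.floordiv (d * (d - 1)) 2)).sum
  -- T loop; Python's `ui = set(upper[i]); ... k in ui` is the pure membership test below
  let T := (PySem.List.pyRange 0 m).foldl (fun t i =>
    (PySem.List.pyGetD upper i []).foldl (fun t j =>
      t + (((PySem.List.pyGetD upper j []).filter (fun k =>
        PySem.Set.contains (PySem.Set.ofList (PySem.List.pyGetD upper i [])) k)).length : Int)) t) 0
  let alpha_2 := PySem.Int.floordiv (m * (m - 1)) 2 - E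
  let alpha_3 := PySem.Int.floordiv (m * (m - 1) * (m - 2)) 6 - E * (m - 2) + P2 - T
  if alpha_3 != 0 then [1, m, alpha_2, alpha_3]
  else if alpha_2 != 0 then [1, m, alpha_2]
  else [1, m]

-- ===== PRECONDITION & SPEC =====
def Spec_compute_independence_poly (cycles : List (List Int)) (out : List Int) : Prop := out = compute_independence_poly_alt cycles
instance (cycles : List (List Int)) (out : List Int) : Decidable (Spec_compute_independence_poly cycles out) := by unfold Spec_compute_independence_poly; infer_instance

-- ===== CLAIM (what is proved, stated in full; the proofs are below) =====
def Claim_equal_compute_independence_poly : Prop := ∀ (cycles : List (List Int)), Dom_compute_independence_poly cycles → Spec_compute_independence_poly cycles (compute_independence_poly cycles)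

-- ===== LEMMAS AND PROOFS =====

def pvInd (b : Bool) : ℤ := if b then 1 else 0

theorem pvInd_and (x y : Bool) : pvInd (x && y) = pvInd x * pvInd y := by
  cases x <;> cases y <;> simp [pvInd]

-- swap of a sum over s ≤ b < c < n
theorem pvSW2 (s n : ℕ) (h : ℕ → ℕ → ℤ) :
    ∑ c ∈ Finset.Ico s n, ∑ b ∈ Finset.Ico s c, h b c
      = ∑ b ∈ Finset.Ico s n, ∑ c ∈ Finset.Ico (b+1) n, h b c := by
  induction n with
  | zero => simp
  | succ n ih =>
    by_cases hs : s ≤ n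
    · rw [Finset.sum_Ico_succ_top hs, Finset.sum_Ico_succ_top hs, ih]
      have h1 : ∀ b ∈ Finset.Ico s n, (∑ c ∈ Finset.Ico (b+1) (n+1), h b c)
          = (∑ c ∈ Finset.Ico (b+1) n, h b c) + h b n := by
        intro b hb
        have : b + 1 ≤ n := by simp [Finset.mem_Ico] at hb; omega
        rw [Finset.sum_Ico_succ_top this]
      rw [Finset.sum_congr rfl h1]
      have : Finset.Ico (n+1) (n+1) = ∅ := by simp
      rw [this]
      rw [Finset.sum_add_distrib]
      ring
    · have he : Finset.Ico s (n+1) = ∅ := Finset.Ico_eq_empty (by omega)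
      rw [he]; simp

def pvC2 (n : ℕ) : ℤ := ∑ i ∈ Finset.Ico 0 n, ∑ j ∈ Finset.Ico (i+1) n, (1:ℤ)
def pvC3 (n : ℕ) : ℤ :=
  ∑ i ∈ Finset.Ico 0 n, ∑ j ∈ Finset.Ico (i+1) n, ∑ k ∈ Finset.Ico (j+1) n, (1:ℤ)

theorem pvC2_succ (n : ℕ) : pvC2 (n+1) = pvC2 n + n := by
  unfold pvC2
  rw [Finset.sum_Ico_succ_top (Nat.zero_le n)]
  have h1 : ∀ i ∈ Finset.Ico 0 n, (∑ j ∈ Finset.Ico (i+1) (n+1), (1:ℤ))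
      = (∑ j ∈ Finset.Ico (i+1) n, (1:ℤ)) + 1 := by
    intro i hi
    have : i + 1 ≤ n := by simp [Finset.mem_Ico] at hi; omega
    rw [Finset.sum_Ico_succ_top this]
  rw [Finset.sum_congr rfl h1, Finset.sum_add_distrib]
  have : Finset.Ico (n+1) (n+1) = ∅ := by simp
  rw [this]; simp [pvC2]

theorem pvC2_id (n : ℕ) : 2 * pvC2 n = n * (n - 1) := by
  induction n with
  | zero => simp [pvC2]
  | succ n ih => rw [pvC2_succ]; push_cast; push_cast at ih; ring_nf; ring_nf at ih; nlinarith [ih]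

theorem pvC3_succ (n : ℕ) : pvC3 (n+1) = pvC3 n + pvC2 n := by
  unfold pvC3 pvC2
  rw [Finset.sum_Ico_succ_top (Nat.zero_le n)]
  have h1 : ∀ i ∈ Finset.Ico 0 n, (∑ j ∈ Finset.Ico (i+1) (n+1), ∑ k ∈ Finset.Ico (j+1) (n+1), (1:ℤ))
      = (∑ j ∈ Finset.Ico (i+1) n, ∑ k ∈ Finset.Ico (j+1) n, (1:ℤ))
        + ∑ j ∈ Finset.Ico (i+1) n, (1:ℤ) := by
    intro i hi
    have hin : i + 1 ≤ n := by simp [Finset.mem_Ico] at hi; omega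
    rw [Finset.sum_Ico_succ_top hin]
    have h2 : ∀ j ∈ Finset.Ico (i+1) n, (∑ k ∈ Finset.Ico (j+1) (n+1), (1:ℤ))
        = (∑ k ∈ Finset.Ico (j+1) n, (1:ℤ)) + 1 := by
      intro j hj
      have : j + 1 ≤ n := by simp [Finset.mem_Ico] at hj; omega
      rw [Finset.sum_Ico_succ_top this]
    rw [Finset.sum_congr rfl h2, Finset.sum_add_distrib]
    have : Finset.Ico (n+1) (n+1) = ∅ := by simp
    rw [this]; simp
  rw [Finset.sum_congr rfl h1, Finset.sum_add_distrib]
  have : Finset.Ico (n+1) (n+1) = ∅ := by simp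
  rw [this]; simp

theorem pvC3_id (n : ℕ) : 6 * pvC3 n = n * (n - 1) * (n - 2) := by
  induction n with
  | zero => simp [pvC3]
  | succ n ih =>
    rw [pvC3_succ]
    have h2 := pvC2_id n
    push_cast; push_cast at ih h2; nlinarith [ih, h2]

-- cherries at a fixed center vs its degree
theorem pvCherry (n : ℕ) (p : ℕ → Bool) :
    2 * (∑ a ∈ Finset.Ico 0 n, ∑ b ∈ Finset.Ico (a+1) n, pvInd (p a && p b))
      = (∑ a ∈ Finset.Ico 0 n, pvInd (p a)) * ((∑ a ∈ Finset.Ico 0 n, pvInd (p a)) - 1) := by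
  induction n with
  | zero => simp
  | succ n ih =>
    rw [Finset.sum_Ico_succ_top (Nat.zero_le n), Finset.sum_Ico_succ_top (Nat.zero_le n)]
    have h1 : ∀ a ∈ Finset.Ico 0 n, (∑ b ∈ Finset.Ico (a+1) (n+1), pvInd (p a && p b))
        = (∑ b ∈ Finset.Ico (a+1) n, pvInd (p a && p b)) + pvInd (p a && p n) := by
      intro a ha
      have : a + 1 ≤ n := by simp [Finset.mem_Ico] at ha; omega
      rw [Finset.sum_Ico_succ_top this]
    rw [Finset.sum_congr rfl h1, Finset.sum_add_distrib]
    have he : Finset.Ico (n+1) (n+1) = ∅ := by simp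
    rw [he]
    have h3 : ∑ a ∈ Finset.Ico 0 n, pvInd (p a && p n)
        = pvInd (p n) * ∑ a ∈ Finset.Ico 0 n, pvInd (p a) := by
      rw [Finset.mul_sum]
      refine Finset.sum_congr rfl (fun a _ => ?_)
      rw [pvInd_and]; ring
    rw [h3]
    have e0 : pvInd false = 0 := rfl
    have e1 : pvInd true = 1 := rfl
    cases hpn : p n <;>
      simp only [e0, e1, Finset.sum_empty, mul_zero, zero_mul, mul_one, one_mul,
        add_zero, zero_add] <;>
      nlinarith [ih]

theorem pvSplitAt' {s n : ℕ} (i : ℕ) (h1 : s ≤ i) (h2 : i < n) (f : ℕ → ℤ) :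
    ∑ j ∈ Finset.Ico s n, f j
      = (∑ j ∈ Finset.Ico s i, f j) + f i + ∑ j ∈ Finset.Ico (i+1) n, f j := by
  rw [← Finset.sum_Ico_consecutive f h1 (by omega : i ≤ n),
      ← Finset.sum_Ico_consecutive f (by omega : i ≤ i+1) (by omega : i+1 ≤ n)]
  have : Finset.Ico i (i+1) = {i} := by ext x; simp
  rw [this, Finset.sum_singleton]; ring

theorem pvSub1 (n : ℕ) (r : ℕ → ℕ → Bool) :
    ∑ i ∈ Finset.Ico 0 n, ∑ j ∈ Finset.Ico (i+1) n, ∑ k ∈ Finset.Ico (j+1) n,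
        (pvInd (r i j) + pvInd (r i k) + pvInd (r j k))
      = (∑ i ∈ Finset.Ico 0 n, ∑ j ∈ Finset.Ico (i+1) n, pvInd (r i j)) * ((n:ℤ) - 2) := by
  simp only [Finset.sum_add_distrib]
  -- Sa : third vertex above j
  have hSa : ∑ i ∈ Finset.Ico 0 n, ∑ j ∈ Finset.Ico (i+1) n, ∑ _k ∈ Finset.Ico (j+1) n, pvInd (r i j)
      = ∑ i ∈ Finset.Ico 0 n, ∑ j ∈ Finset.Ico (i+1) n, pvInd (r i j) * ((n:ℤ) - 1 - (j:ℤ)) := by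
    refine Finset.sum_congr rfl (fun i hi => Finset.sum_congr rfl (fun j hj => ?_))
    simp only [Finset.mem_Ico] at hj
    rw [Finset.sum_const, Nat.card_Ico, nsmul_eq_mul, Nat.cast_sub (by omega : j + 1 ≤ n)]
    push_cast; ring
  -- Sb : third vertex between i and k
  have hSb : ∑ i ∈ Finset.Ico 0 n, ∑ j ∈ Finset.Ico (i+1) n, ∑ k ∈ Finset.Ico (j+1) n, pvInd (r i k)
      = ∑ i ∈ Finset.Ico 0 n, ∑ k ∈ Finset.Ico (i+1) n, pvInd (r i k) * ((k:ℤ) - 1 - (i:ℤ)) := by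
    refine Finset.sum_congr rfl (fun i hi => ?_)
    rw [← pvSW2 (i+1) n (fun b c => pvInd (r i c))]
    refine Finset.sum_congr rfl (fun k hk => ?_)
    simp only [Finset.mem_Ico] at hk
    rw [Finset.sum_const, Nat.card_Ico, nsmul_eq_mul, Nat.cast_sub (by omega : i + 1 ≤ k)]
    push_cast; ring
  -- Sc : third vertex below j
  have hSc : ∑ i ∈ Finset.Ico 0 n, ∑ j ∈ Finset.Ico (i+1) n, ∑ k ∈ Finset.Ico (j+1) n, pvInd (r j k)
      = ∑ j ∈ Finset.Ico 0 n, ∑ k ∈ Finset.Ico (j+1) n, pvInd (r j k) * (j:ℤ) := by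
    rw [← pvSW2 0 n (fun b c => ∑ k ∈ Finset.Ico (c+1) n, pvInd (r c k))]
    refine Finset.sum_congr rfl (fun j hj => ?_)
    rw [Finset.sum_const, Nat.card_Ico, nsmul_eq_mul, Finset.mul_sum]
    exact Finset.sum_congr rfl (fun k _ => by rw [Nat.sub_zero]; ring)
  rw [hSa, hSb, hSc, Finset.sum_mul]
  rw [← Finset.sum_add_distrib, ← Finset.sum_add_distrib]
  refine Finset.sum_congr rfl (fun i hi => ?_)
  rw [Finset.sum_mul, ← Finset.sum_add_distrib, ← Finset.sum_add_distrib]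
  refine Finset.sum_congr rfl (fun j hj => ?_)
  ring

theorem pvSub2 (n : ℕ) (r : ℕ → ℕ → Bool) (hsym : ∀ i j, r i j = r j i)
    (hirr : ∀ i, r i i = false) :
    ∑ c ∈ Finset.Ico 0 n, ∑ a ∈ Finset.Ico 0 n, ∑ b ∈ Finset.Ico (a+1) n,
        pvInd (r c a && r c b)
      = ∑ i ∈ Finset.Ico 0 n, ∑ j ∈ Finset.Ico (i+1) n, ∑ k ∈ Finset.Ico (j+1) n,
          (pvInd (r i j && r i k) + pvInd (r i j && r j k) + pvInd (r i k && r j k)) := by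
  have hdecomp : ∀ c ∈ Finset.Ico 0 n,
      (∑ a ∈ Finset.Ico 0 n, ∑ b ∈ Finset.Ico (a+1) n, pvInd (r c a && r c b))
        = (∑ a ∈ Finset.Ico (c+1) n, ∑ b ∈ Finset.Ico (a+1) n, pvInd (r c a && r c b))
          + (∑ a ∈ Finset.Ico 0 c, ∑ b ∈ Finset.Ico (c+1) n, pvInd (r c a && r c b))
          + (∑ a ∈ Finset.Ico 0 c, ∑ b ∈ Finset.Ico (a+1) c, pvInd (r c a && r c b)) := by
    intro c hc
    simp only [Finset.mem_Ico] at hc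
    rw [pvSplitAt' c (Nat.zero_le c) hc.2]
    have hcc : ∀ b, pvInd (r c c && r c b) = 0 := by
      intro b; rw [hirr]; simp [pvInd]
    have h0 : ∑ b ∈ Finset.Ico (c+1) n, pvInd (r c c && r c b) = 0 := by
      simp [hcc]
    have hlow : ∀ a ∈ Finset.Ico 0 c,
        (∑ b ∈ Finset.Ico (a+1) n, pvInd (r c a && r c b))
          = (∑ b ∈ Finset.Ico (a+1) c, pvInd (r c a && r c b))
            + ∑ b ∈ Finset.Ico (c+1) n, pvInd (r c a && r c b) := by
      intro a ha
      simp only [Finset.mem_Ico] at ha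
      rw [pvSplitAt' c (by omega) hc.2]
      rw [hirr, Bool.and_false]
      simp [pvInd]
    rw [h0, Finset.sum_congr rfl hlow, Finset.sum_add_distrib]
    ring
  rw [Finset.sum_congr rfl hdecomp]
  simp only [Finset.sum_add_distrib]
  congr 1
  · congr 1
    · -- Y : center is the middle (X, center smallest, is closed by congr)
      rw [pvSW2 0 n (fun a c => ∑ b ∈ Finset.Ico (c+1) n, pvInd (r c a && r c b))]
      refine Finset.sum_congr rfl (fun i _ => Finset.sum_congr rfl (fun j _ =>
        Finset.sum_congr rfl (fun k _ => ?_)))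
      rw [hsym i j]
  · -- Z : center is the largest
    rw [pvSW2 0 n (fun a c => ∑ b ∈ Finset.Ico (a+1) c, pvInd (r c a && r c b))]
    refine Finset.sum_congr rfl (fun i _ => ?_)
    rw [pvSW2 (i+1) n (fun b c => pvInd (r c i && r c b))]
    refine Finset.sum_congr rfl (fun j _ => Finset.sum_congr rfl (fun k _ => ?_))
    rw [hsym i k, hsym j k]

theorem pvTripleInd (x y z : Bool) :
    pvInd (!x && !y && !z)
      = 1 - (pvInd x + pvInd y + pvInd z)
        + (pvInd (x && y) + pvInd (x && z) + pvInd (y && z)) - pvInd (x && y && z) := by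
  cases x <;> cases y <;> cases z <;> simp [pvInd]

theorem pvMain (n : ℕ) (r : ℕ → ℕ → Bool) (hsym : ∀ i j, r i j = r j i)
    (hirr : ∀ i, r i i = false) :
    ∑ i ∈ Finset.Ico 0 n, ∑ j ∈ Finset.Ico (i+1) n, ∑ k ∈ Finset.Ico (j+1) n,
        pvInd (!(r i j) && !(r i k) && !(r j k))
      = pvC3 n
        - (∑ i ∈ Finset.Ico 0 n, ∑ j ∈ Finset.Ico (i+1) n, pvInd (r i j)) * ((n:ℤ) - 2)
        + (∑ c ∈ Finset.Ico 0 n, ∑ a ∈ Finset.Ico 0 n, ∑ b ∈ Finset.Ico (a+1) n,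
            pvInd (r c a && r c b))
        - ∑ i ∈ Finset.Ico 0 n, ∑ j ∈ Finset.Ico (i+1) n, ∑ k ∈ Finset.Ico (j+1) n,
            pvInd (r i j && r i k && r j k) := by
  have hpt : ∀ i j k : ℕ,
      pvInd (!(r i j) && !(r i k) && !(r j k))
        = 1 - (pvInd (r i j) + pvInd (r i k) + pvInd (r j k))
          + (pvInd (r i j && r i k) + pvInd (r i j && r j k) + pvInd (r i k && r j k))
          - pvInd (r i j && r i k && r j k) := by
    intro i j k; exact pvTripleInd _ _ _
  calc ∑ i ∈ Finset.Ico 0 n, ∑ j ∈ Finset.Ico (i+1) n, ∑ k ∈ Finset.Ico (j+1) n,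
        pvInd (!(r i j) && !(r i k) && !(r j k))
      = ∑ i ∈ Finset.Ico 0 n, ∑ j ∈ Finset.Ico (i+1) n, ∑ k ∈ Finset.Ico (j+1) n,
          (1 - (pvInd (r i j) + pvInd (r i k) + pvInd (r j k))
            + (pvInd (r i j && r i k) + pvInd (r i j && r j k) + pvInd (r i k && r j k))
            - pvInd (r i j && r i k && r j k)) := by
        exact Finset.sum_congr rfl (fun i _ => Finset.sum_congr rfl (fun j _ =>
          Finset.sum_congr rfl (fun k _ => hpt i j k)))
    _ = pvC3 n
        - (∑ i ∈ Finset.Ico 0 n, ∑ j ∈ Finset.Ico (i+1) n, ∑ k ∈ Finset.Ico (j+1) n,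
            (pvInd (r i j) + pvInd (r i k) + pvInd (r j k)))
        + (∑ i ∈ Finset.Ico 0 n, ∑ j ∈ Finset.Ico (i+1) n, ∑ k ∈ Finset.Ico (j+1) n,
            (pvInd (r i j && r i k) + pvInd (r i j && r j k) + pvInd (r i k && r j k)))
        - ∑ i ∈ Finset.Ico 0 n, ∑ j ∈ Finset.Ico (i+1) n, ∑ k ∈ Finset.Ico (j+1) n,
            pvInd (r i j && r i k && r j k) := by
        simp only [Finset.sum_sub_distrib, Finset.sum_add_distrib]
        unfold pvC3; ring
    _ = _ := by rw [pvSub1, ← pvSub2 n r hsym hirr]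

theorem pvBridgeSum (g : ℤ → ℤ) (a n : ℕ) :
    ((PySem.List.pyRange (a:ℤ) (n:ℤ)).map g).sum = ∑ j ∈ Finset.Ico a n, g (j:ℤ) := by
  induction n with
  | zero =>
    rw [PySem.List.pyRange_one_eq_nil (by exact_mod_cast Nat.zero_le a)]
    simp
  | succ n ih =>
    by_cases h : a ≤ n
    · have : ((n+1:ℕ):ℤ) = (n:ℤ) + 1 := by push_cast; ring
      rw [this, PySem.List.pyRange_one_succ_right (by exact_mod_cast h),
        List.map_append, List.sum_append, ih, Finset.sum_Ico_succ_top h]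
      simp
    · rw [PySem.List.pyRange_one_eq_nil (by exact_mod_cast (by omega : n + 1 ≤ a)),
        Finset.Ico_eq_empty (by omega)]
      simp

theorem pvCountP_eq_sum (l : List ℤ) (p : ℤ → Bool) :
    ((l.countP p : ℕ) : ℤ) = (l.map (fun x => pvInd (p x))).sum := by
  induction l with
  | nil => simp
  | cons x t ih =>
    rw [List.countP_cons, List.map_cons, List.sum_cons]
    cases h : p x <;> simp [h, pvInd, ih] <;> ring

theorem pvSumFilter {α : Type} (l : List α) (q : α → Bool) (g : α → ℤ) :
    ((l.filter q).map g).sum = (l.map (fun x => if q x then g x else 0)).sum := by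
  induction l with
  | nil => simp
  | cons x t ih =>
    cases h : q x <;> simp [List.filter_cons, h, ih]

theorem pvFdiv2 (x q : ℤ) (h : x = 2 * q) : PySem.Int.floordiv x 2 = q := by
  subst h
  show (2 * q).fdiv 2 = q
  rw [Int.mul_fdiv_cancel_left _ (by norm_num)]

theorem pvFdiv6 (x q : ℤ) (h : x = 6 * q) : PySem.Int.floordiv x 6 = q := by
  subst h
  show (6 * q).fdiv 6 = q
  rw [Int.mul_fdiv_cancel_left _ (by norm_num)]

theorem pvShares_iff (a b : List Int) : pvShares a b = true ↔ ∃ x, x ∈ a ∧ x ∈ b := by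
  unfold pvShares
  constructor
  · intro h
    have hne : PySem.Set.inter a b ≠ [] := by
      intro he; rw [he] at h; simp at h
    obtain ⟨y, hy⟩ := List.exists_mem_of_ne_nil _ hne
    exact ⟨y, ((PySem.Set.mem_inter a b y).1 hy).1, ((PySem.Set.mem_inter a b y).1 hy).2⟩
  · rintro ⟨x, hx1, hx2⟩
    have hm : x ∈ PySem.Set.inter a b := (PySem.Set.mem_inter a b x).2 ⟨hx1, hx2⟩
    cases hl : PySem.Set.inter a b with
    | nil => rw [hl] at hm; simp at hm
    | cons y t => rfl

theorem pvInd_not (x : Bool) : pvInd (!x) = 1 - pvInd x := by cases x <;> simp [pvInd]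


-- ===== conflict relation and symmetry =====

def pvRelL (cycles : List (List Int)) (i j : ℕ) : Bool :=
  decide (i ≠ j) && pvShares (cycles.getD i []) (cycles.getD j [])

theorem pvShares_comm (a b : List Int) : pvShares a b = pvShares b a := by
  cases hx : pvShares a b <;> cases hy : pvShares b a <;> try rfl
  · obtain ⟨x, h1, h2⟩ := (pvShares_iff b a).1 hy
    have h3 := (pvShares_iff a b).2 ⟨x, h2, h1⟩
    rw [hx] at h3; exact (Bool.false_ne_true h3).elim
  · obtain ⟨x, h1, h2⟩ := (pvShares_iff a b).1 hx
    have h3 := (pvShares_iff b a).2 ⟨x, h2, h1⟩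
    rw [hy] at h3; exact (Bool.false_ne_true h3).elim

theorem pvRelL_symm (cycles : List (List Int)) (i j : ℕ) :
    pvRelL cycles i j = pvRelL cycles j i := by
  unfold pvRelL
  rw [pvShares_comm]
  by_cases h : i = j
  · subst h; rfl
  · rw [decide_eq_true h, decide_eq_true (Ne.symm h)]

theorem pvRelL_irrefl (cycles : List (List Int)) (i : ℕ) : pvRelL cycles i i = false := by
  simp [pvRelL]

-- ===== the conflict-matrix build of A, characterized =====

def pvStep (cycles : List (List Int)) (conf : List (List Bool)) (p : ℤ × ℤ) :
    List (List Bool) :=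
  if pvShares (PySem.List.pyGetD cycles p.1 []) (PySem.List.pyGetD cycles p.2 []) then
    pvSetT (pvSetT conf p.1 p.2) p.2 p.1
  else conf

def pvPairs (m : ℤ) : List (ℤ × ℤ) :=
  (PySem.List.pyRange 0 m).flatMap (fun i =>
    (PySem.List.pyRange (i+1) m).map (fun j => (i, j)))

theorem pvBuildFlat (cycles : List (List Int)) (m : ℤ) (conf0 : List (List Bool)) :
    (PySem.List.pyRange 0 m).foldl (fun conf i =>
      (PySem.List.pyRange (i+1) m).foldl (fun conf j =>
        if pvShares (PySem.List.pyGetD cycles i []) (PySem.List.pyGetD cycles j []) then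
          pvSetT (pvSetT conf i j) j i
        else conf) conf) conf0
      = (pvPairs m).foldl (pvStep cycles) conf0 := by
  unfold pvPairs
  rw [List.foldl_flatMap]
  refine (PySem.List.foldl_congr_mem _ _ _ _ ?_)
  intro acc i _
  rw [List.foldl_map]
  rfl

theorem pvMget_cast (conf : List (List Bool)) (i j : ℕ) :
    pvMget conf (i:ℤ) (j:ℤ) = (conf.getD i []).getD j false := by
  unfold pvMget
  rw [PySem.List.pyGetD_natCast, PySem.List.pyGetD_natCast]

theorem pvGetD_modify (l : List (List Bool)) (a : ℕ) (f : List Bool → List Bool)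
    (hf : f [] = []) (i : ℕ) :
    (l.modify a f).getD i [] = if a = i then f (l.getD i []) else l.getD i [] := by
  rw [List.getD_eq_getElem?_getD, List.getD_eq_getElem?_getD, List.getElem?_modify]
  cases h : l[i]? with
  | none => by_cases hai : a = i <;> simp [hai, hf]
  | some row => by_cases hai : a = i <;> simp [hai]

theorem pvGetD_set (row : List Bool) (b j : ℕ) :
    (row.set b true).getD j false
      = if b = j ∧ j < row.length then true else row.getD j false := by
  rw [List.getD_eq_getElem?_getD, List.getD_eq_getElem?_getD, List.getElem?_set]
  by_cases hbj : b = j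
  · subst hbj
    by_cases h : b < row.length
    · simp [h]
    · simp [h, List.getElem?_eq_none (by omega : row.length ≤ b)]
  · simp [hbj]

def pvWf (m : ℕ) (conf : List (List Bool)) : Prop :=
  ∀ k : ℕ, k < m → (conf.getD k []).length = m

theorem pvWf_setT (m : ℕ) (conf : List (List Bool)) (hwf : pvWf m conf) (a b : ℤ) :
    pvWf m (pvSetT conf a b) := by
  intro k hk
  unfold pvSetT
  rw [pvGetD_modify _ _ _ rfl]
  by_cases h : a.toNat = k
  · rw [if_pos h, List.length_set]; exact hwf k hk
  · rw [if_neg h]; exact hwf k hk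

theorem pvWf_step (m : ℕ) (cycles : List (List Int)) (conf : List (List Bool))
    (hwf : pvWf m conf) (p : ℤ × ℤ) : pvWf m (pvStep cycles conf p) := by
  unfold pvStep
  split
  · exact pvWf_setT m _ (pvWf_setT m conf hwf _ _) _ _
  · exact hwf

theorem pvGetD_set' (row : List Bool) (m b j : ℕ) (hm : row.length = m) (hj : j < m) :
    (row.set b true).getD j false = if b = j then true else row.getD j false := by
  rw [pvGetD_set]
  by_cases h : b = j
  · rw [if_pos ⟨h, by omega⟩, if_pos h]
  · rw [if_neg (by tauto), if_neg h]

theorem pvMget_step (cycles : List (List Int)) (m : ℕ) (conf : List (List Bool))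
    (hwf : pvWf m conf) (a b i j : ℕ) (ha : a < m) (hb : b < m) (hi : i < m) (hj : j < m) :
    pvMget (pvStep cycles conf ((a:ℤ), (b:ℤ))) (i:ℤ) (j:ℤ)
      = (pvMget conf (i:ℤ) (j:ℤ)
         || (pvShares (cycles.getD a []) (cycles.getD b [])
             && ((decide (a = i) && decide (b = j)) || (decide (a = j) && decide (b = i))))) := by
  unfold pvStep
  simp only [PySem.List.pyGetD_natCast]
  cases hsh : pvShares (cycles.getD a []) (cycles.getD b []) with
  | false => simp
  | true =>
    rw [if_pos rfl]
    simp only [Bool.true_and]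
    rw [pvMget_cast, pvMget_cast]
    unfold pvSetT
    simp only [Int.toNat_natCast]
    rw [pvGetD_modify _ _ _ rfl, pvGetD_modify _ _ _ rfl]
    have hrowi : (conf.getD i []).length = m := hwf i hi
    by_cases hbi : b = i <;> by_cases hai : a = i
    · rw [if_pos hbi, if_pos hai,
        pvGetD_set' _ m a j (by rw [List.length_set]; exact hrowi) hj,
        pvGetD_set' _ m b j hrowi hj]
      by_cases haj : a = j <;> by_cases hbj : b = j <;> subst_vars <;> simp_all
    · rw [if_pos hbi, if_neg hai,
        pvGetD_set' _ m a j hrowi hj]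
      by_cases haj : a = j <;> subst_vars <;> simp_all
    · rw [if_neg hbi, if_pos hai,
        pvGetD_set' _ m b j hrowi hj]
      by_cases hbj : b = j <;> subst_vars <;> simp_all
    · rw [if_neg hbi, if_neg hai]
      simp [hai, hbi]

theorem pvFoldVal (cycles : List (List Int)) (m : ℕ) (L : List (ℤ × ℤ))
    (hL : ∀ p ∈ L, ∃ a b : ℕ, p = ((a:ℤ), (b:ℤ)) ∧ a < m ∧ b < m) :
    ∀ conf, pvWf m conf → ∀ i j : ℕ, i < m → j < m →
      pvMget (L.foldl (pvStep cycles) conf) (i:ℤ) (j:ℤ)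
        = (pvMget conf (i:ℤ) (j:ℤ)
           || L.any (fun p =>
              pvShares (PySem.List.pyGetD cycles p.1 []) (PySem.List.pyGetD cycles p.2 [])
              && ((p.1 == (i:ℤ) && p.2 == (j:ℤ)) || (p.1 == (j:ℤ) && p.2 == (i:ℤ))))) := by
  induction L with
  | nil => intro conf _ i j _ _; simp
  | cons p t ih =>
    intro conf hwf i j hi hj
    obtain ⟨a, b, rfl, ha, hb⟩ := hL p (List.mem_cons_self)
    rw [List.foldl_cons, List.any_cons]
    rw [ih (fun q hq => hL q (List.mem_cons_of_mem _ hq)) _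
        (pvWf_step m cycles conf hwf _) i j hi hj]
    rw [pvMget_step cycles m conf hwf a b i j ha hb hi hj]
    simp only [PySem.List.pyGetD_natCast]
    have e1 : (((a:ℕ):ℤ) == ((i:ℕ):ℤ)) = decide (a = i) := by
      by_cases h : a = i <;> simp [h] <;> omega
    have e2 : (((b:ℕ):ℤ) == ((j:ℕ):ℤ)) = decide (b = j) := by
      by_cases h : b = j <;> simp [h] <;> omega
    have e3 : (((a:ℕ):ℤ) == ((j:ℕ):ℤ)) = decide (a = j) := by
      by_cases h : a = j <;> simp [h] <;> omega
    have e4 : (((b:ℕ):ℤ) == ((i:ℕ):ℤ)) = decide (b = i) := by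
      by_cases h : b = i <;> simp [h] <;> omega
    rw [e1, e2, e3, e4]
    cases pvMget conf (i:ℤ) (j:ℤ) <;> cases pvShares (cycles.getD a []) (cycles.getD b []) <;>
      simp [Bool.or_assoc, Bool.or_comm, Bool.or_left_comm]

theorem mem_pvPairs {n : ℕ} {p : ℤ × ℤ} :
    p ∈ pvPairs (n:ℤ) ↔ ∃ a b : ℕ, a < b ∧ b < n ∧ p = ((a:ℤ), (b:ℤ)) := by
  unfold pvPairs
  simp only [List.mem_flatMap, List.mem_map, PySem.List.mem_pyRange_one]
  constructor
  · rintro ⟨i, ⟨h0, hin⟩, j, ⟨hji, hjn⟩, rfl⟩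
    refine ⟨i.toNat, j.toNat, by omega, by omega, ?_⟩
    simp [Int.toNat_of_nonneg h0, Int.toNat_of_nonneg (by omega : (0:ℤ) ≤ j)]
  · rintro ⟨a, b, hab, hbn, rfl⟩
    exact ⟨(a:ℤ), ⟨Int.natCast_nonneg a, by exact_mod_cast (by omega : a < n)⟩,
      (b:ℤ), ⟨by push_cast; omega, by exact_mod_cast hbn⟩, rfl⟩

theorem pvConfChar (cycles : List (List Int)) (n : ℕ) (i j : ℕ) (hi : i < n) (hj : j < n) :
    pvMget ((pvPairs (n:ℤ)).foldl (pvStep cycles)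
        ((PySem.List.pyRange 0 (n:ℤ)).map (fun _ => List.replicate ((n:ℤ)).toNat false)))
        (i:ℤ) (j:ℤ)
      = pvRelL cycles i j := by
  have hconf0 : (PySem.List.pyRange 0 (n:ℤ)).map (fun _ => List.replicate ((n:ℤ)).toNat false)
      = List.replicate n (List.replicate n false) := by
    simp [List.map_const', PySem.List.length_pyRange_one]
  have hwf : pvWf n (List.replicate n (List.replicate n false)) := by
    intro k hk
    rw [List.getD_replicate _ hk, List.length_replicate]
  have hmget0 : pvMget (List.replicate n (List.replicate n false)) (i:ℤ) (j:ℤ) = false := by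
    rw [pvMget_cast, List.getD_replicate _ hi, List.getD_replicate _ hj]
  rw [hconf0, pvFoldVal cycles n _ ?hpairs _ hwf i j hi hj, hmget0, Bool.false_or]
  case hpairs =>
    intro p hp
    obtain ⟨a, b, _, hbn, rfl⟩ := mem_pvPairs.1 hp
    exact ⟨a, b, rfl, by omega, hbn⟩
  -- any over the pair list = pvRelL
  cases hrel : pvRelL cycles i j with
  | true =>
    unfold pvRelL at hrel
    obtain ⟨hne, hsh⟩ := Bool.and_eq_true_iff.1 hrel
    have hne' : i ≠ j := of_decide_eq_true hne
    rw [List.any_eq_true]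
    rcases Nat.lt_or_ge i j with hij | hij
    · refine ⟨((i:ℤ), (j:ℤ)), mem_pvPairs.2 ⟨i, j, hij, hj, rfl⟩, ?_⟩
      rw [PySem.List.pyGetD_natCast, PySem.List.pyGetD_natCast, hsh]
      simp
    · have hji : j < i := by omega
      refine ⟨((j:ℤ), (i:ℤ)), mem_pvPairs.2 ⟨j, i, hji, hi, rfl⟩, ?_⟩
      rw [pvShares_comm] at hsh
      rw [PySem.List.pyGetD_natCast, PySem.List.pyGetD_natCast, hsh]
      simp
  | false =>
    rw [Bool.eq_false_iff]
    intro hany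
    obtain ⟨p, hp, hpred⟩ := List.any_eq_true.1 hany
    obtain ⟨a, b, hab, hbn, rfl⟩ := mem_pvPairs.1 hp
    simp only [PySem.List.pyGetD_natCast] at hpred
    obtain ⟨hsh, hmatch⟩ := Bool.and_eq_true_iff.1 hpred
    unfold pvRelL at hrel
    rcases Bool.or_eq_true_iff.1 hmatch with hm | hm
    · obtain ⟨h1, h2⟩ := Bool.and_eq_true_iff.1 hm
      have ha : a = i := by exact_mod_cast eq_of_beq h1
      have hbj : b = j := by exact_mod_cast eq_of_beq h2
      have hij : i ≠ j := by omega
      rw [ha, hbj] at hsh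
      rw [decide_eq_true hij, Bool.true_and, hsh] at hrel
      exact Bool.false_ne_true hrel.symm
    · obtain ⟨h1, h2⟩ := Bool.and_eq_true_iff.1 hm
      have ha : a = j := by exact_mod_cast eq_of_beq h1
      have hbi : b = i := by exact_mod_cast eq_of_beq h2
      have hij : i ≠ j := by omega
      rw [ha, hbi] at hsh
      rw [decide_eq_true hij, Bool.true_and, pvShares_comm] at hrel
      rw [hrel] at hsh
      exact Bool.false_ne_true hsh

-- ===== fold-to-sum characterization of A's counting loops =====

theorem pvBridgeSum0 (g : ℤ → ℤ) (n : ℕ) :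
    ((PySem.List.pyRange 0 (n:ℤ)).map g).sum = ∑ j ∈ Finset.Ico 0 n, g (j:ℤ) := by
  simpa using pvBridgeSum g 0 n

theorem pvBridgeSumS (g : ℤ → ℤ) (n i : ℕ) :
    ((PySem.List.pyRange ((i:ℤ)+1) (n:ℤ)).map g).sum = ∑ j ∈ Finset.Ico (i+1) n, g (j:ℤ) := by
  rw [show ((i:ℤ)+1) = (((i+1 : ℕ)):ℤ) by push_cast; ring, pvBridgeSum]

theorem pvAlpha2A (cycles : List (List Int)) (conflict : List (List Bool)) (n : ℕ)
    (hchar : ∀ i j : ℕ, i < n → j < n → pvMget conflict (i:ℤ) (j:ℤ) = pvRelL cycles i j) :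
    (PySem.List.pyRange 0 (n:ℤ)).foldl (fun a i =>
      (PySem.List.pyRange (i+1) (n:ℤ)).foldl (fun a j =>
        if !(pvMget conflict i j) then a + 1 else a) a) (0 : ℤ)
      = ∑ i ∈ Finset.Ico 0 n, ∑ j ∈ Finset.Ico (i+1) n, pvInd (!(pvRelL cycles i j)) := by
  have h1 := PySem.List.foldl_congr_mem (PySem.List.pyRange 0 (n:ℤ))
    (fun a i => (PySem.List.pyRange (i+1) (n:ℤ)).foldl (fun a j =>
        if !(pvMget conflict i j) then a + 1 else a) a)
    (fun a i => a + (((PySem.List.pyRange (i+1) (n:ℤ)).countP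
        (fun j => !(pvMget conflict i j)) : ℕ) : ℤ))
    (0 : ℤ) (fun acc i _ => PySem.List.foldl_if_add_one _ _ _)
  rw [h1, PySem.List.foldl_add, zero_add, pvBridgeSum0]
  refine Finset.sum_congr rfl (fun i hi => ?_)
  simp only [Finset.mem_Ico] at hi
  rw [show ((i:ℤ) + 1) = (((i+1 : ℕ)):ℤ) by push_cast; ring,
    pvCountP_eq_sum, pvBridgeSum]
  refine Finset.sum_congr rfl (fun j hj => ?_)
  simp only [Finset.mem_Ico] at hj
  rw [hchar i j hi.2 (by omega)]

theorem pvAlpha3A (cycles : List (List Int)) (conflict : List (List Bool)) (n : ℕ)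
    (hchar : ∀ i j : ℕ, i < n → j < n → pvMget conflict (i:ℤ) (j:ℤ) = pvRelL cycles i j) :
    (PySem.List.pyRange 0 (n:ℤ)).foldl (fun a i =>
      (PySem.List.pyRange (i+1) (n:ℤ)).foldl (fun a j =>
        if pvMget conflict i j then a
        else (PySem.List.pyRange (j+1) (n:ℤ)).foldl (fun a k =>
          if !(pvMget conflict i k) && !(pvMget conflict j k) then a + 1 else a) a) a) (0 : ℤ)
      = ∑ i ∈ Finset.Ico 0 n, ∑ j ∈ Finset.Ico (i+1) n, ∑ k ∈ Finset.Ico (j+1) n,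
          pvInd (!(pvRelL cycles i j) && !(pvRelL cycles i k) && !(pvRelL cycles j k)) := by
  have hinner : ∀ (i : ℤ), ∀ (acc : ℤ), ∀ j ∈ PySem.List.pyRange (i+1) (n:ℤ),
      (if pvMget conflict i j then acc
        else (PySem.List.pyRange (j+1) (n:ℤ)).foldl (fun a k =>
          if !(pvMget conflict i k) && !(pvMget conflict j k) then a + 1 else a) acc)
      = acc + (if pvMget conflict i j then 0
          else (((PySem.List.pyRange (j+1) (n:ℤ)).countP
            (fun k => !(pvMget conflict i k) && !(pvMget conflict j k)) : ℕ) : ℤ)) := by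
    intro i acc j _
    cases h : pvMget conflict i j with
    | true => simp
    | false =>
      simp only [h, Bool.false_eq_true, if_false]
      rw [PySem.List.foldl_if_add_one]
  have h1 := PySem.List.foldl_congr_mem (PySem.List.pyRange 0 (n:ℤ))
    (fun a i => (PySem.List.pyRange (i+1) (n:ℤ)).foldl (fun a j =>
        if pvMget conflict i j then a
        else (PySem.List.pyRange (j+1) (n:ℤ)).foldl (fun a k =>
          if !(pvMget conflict i k) && !(pvMget conflict j k) then a + 1 else a) a) a)
    (fun a i => (PySem.List.pyRange (i+1) (n:ℤ)).foldl (fun a j =>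
        a + (if pvMget conflict i j then 0
          else (((PySem.List.pyRange (j+1) (n:ℤ)).countP
            (fun k => !(pvMget conflict i k) && !(pvMget conflict j k)) : ℕ) : ℤ))) a)
    (0 : ℤ)
    (fun acc i _ => PySem.List.foldl_congr_mem _ _ _ _ (fun a j hj => hinner i a j hj))
  rw [h1]
  have h2 := PySem.List.foldl_congr_mem (PySem.List.pyRange 0 (n:ℤ))
    (fun a i => (PySem.List.pyRange (i+1) (n:ℤ)).foldl (fun a j =>
        a + (if pvMget conflict i j then 0
          else (((PySem.List.pyRange (j+1) (n:ℤ)).countP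
            (fun k => !(pvMget conflict i k) && !(pvMget conflict j k)) : ℕ) : ℤ))) a)
    (fun a i => a + ((PySem.List.pyRange (i+1) (n:ℤ)).map (fun j =>
        (if pvMget conflict i j then 0
          else (((PySem.List.pyRange (j+1) (n:ℤ)).countP
            (fun k => !(pvMget conflict i k) && !(pvMget conflict j k)) : ℕ) : ℤ)))).sum)
    (0 : ℤ) (fun acc i _ => PySem.List.foldl_add _ _ _)
  rw [h2, PySem.List.foldl_add, zero_add, pvBridgeSum0]
  refine Finset.sum_congr rfl (fun i hi => ?_)
  simp only [Finset.mem_Ico] at hi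
  rw [show ((i:ℤ) + 1) = (((i+1 : ℕ)):ℤ) by push_cast; ring, pvBridgeSum]
  refine Finset.sum_congr rfl (fun j hj => ?_)
  simp only [Finset.mem_Ico] at hj
  have hj2 : j < n := by omega
  rw [hchar i j hi.2 hj2]
  cases hrel : pvRelL cycles i j with
  | true =>
    simp only [if_pos rfl]
    symm
    refine Finset.sum_eq_zero (fun k _ => ?_)
    simp [pvInd]
  | false =>
    simp only [Bool.false_eq_true, if_false]
    rw [show ((j:ℤ) + 1) = (((j+1 : ℕ)):ℤ) by push_cast; ring,
      pvCountP_eq_sum, pvBridgeSum]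
    refine Finset.sum_congr rfl (fun k hk => ?_)
    simp only [Finset.mem_Ico] at hk
    rw [hchar i k hi.2 (by omega), hchar j k hj2 (by omega)]
    simp

-- ===== B's quantities as Finset sums =====

theorem pvConflictChar (cycles : List (List Int)) (n : ℕ) (i j : ℕ) (hi : i < n) (hj : j < n) :
    pvMget (pvConflict cycles (n:ℤ)) (i:ℤ) (j:ℤ) = pvRelL cycles i j := by
  unfold pvConflict
  rw [pvBuildFlat]
  exact pvConfChar cycles n i j hi hj

def pvEE (cycles : List (List Int)) (n : ℕ) : ℤ :=
  ∑ i ∈ Finset.Ico 0 n, ∑ j ∈ Finset.Ico (i+1) n, pvInd (pvRelL cycles i j)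

def pvCHH (cycles : List (List Int)) (n : ℕ) : ℤ :=
  ∑ c ∈ Finset.Ico 0 n, ∑ a ∈ Finset.Ico 0 n, ∑ b ∈ Finset.Ico (a+1) n,
    pvInd (pvRelL cycles c a && pvRelL cycles c b)

def pvTT (cycles : List (List Int)) (n : ℕ) : ℤ :=
  ∑ i ∈ Finset.Ico 0 n, ∑ j ∈ Finset.Ico (i+1) n, ∑ k ∈ Finset.Ico (j+1) n,
    pvInd (pvRelL cycles i j && pvRelL cycles i k && pvRelL cycles j k)

-- B's disjointness test agrees with A's intersection test
theorem pvSharesD_eq (a b : List Int) : pvSharesD a b = pvShares a b := by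
  unfold pvSharesD
  cases h : pvShares a b with
  | true =>
    obtain ⟨x, h1, h2⟩ := (pvShares_iff a b).1 h
    cases hd : PySem.Set.isdisjoint a b with
    | false => rfl
    | true => exact absurd h2 ((PySem.Set.isdisjoint_iff a b).1 hd x h1)
  | false =>
    cases hd : PySem.Set.isdisjoint a b with
    | true => rfl
    | false =>
      exfalso
      have hnall : ¬ (∀ x ∈ a, x ∉ b) := by
        intro hall
        rw [(PySem.Set.isdisjoint_iff a b).2 hall] at hd
        exact Bool.false_ne_true hd.symm
      push_neg at hnall
      obtain ⟨x, hx1, hx2⟩ := hnall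
      rw [(pvShares_iff a b).2 ⟨x, hx1, hx2⟩] at h
      exact Bool.false_ne_true h.symm

-- B's row predicate is the conflict relation (off the diagonal)
theorem pvRowPred (cycles : List (List Int)) (i j : ℕ) (hij : i ≠ j) :
    pvSharesD (PySem.List.pyGetD cycles (i:ℤ) []) (PySem.List.pyGetD cycles (j:ℤ) [])
      = pvRelL cycles i j := by
  rw [PySem.List.pyGetD_natCast, PySem.List.pyGetD_natCast, pvSharesD_eq]
  unfold pvRelL
  rw [decide_eq_true hij, Bool.true_and]

theorem pvUpperGet (cycles : List (List Int)) (n i : ℕ) (hi : i < n) :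
    PySem.List.pyGetD (pvUpper cycles (n:ℤ)) (i:ℤ) []
      = (PySem.List.pyRange ((i:ℤ)+1) (n:ℤ)).filter (fun j =>
          pvSharesD (PySem.List.pyGetD cycles (i:ℤ) []) (PySem.List.pyGetD cycles j [])) := by
  unfold pvUpper
  exact PySem.List.pyGetD_map_pyRange _ n i [] hi

theorem pvUpperLen (cycles : List (List Int)) (n i : ℕ) :
    ((((PySem.List.pyRange ((i:ℤ)+1) (n:ℤ)).filter (fun j =>
        pvSharesD (PySem.List.pyGetD cycles (i:ℤ) []) (PySem.List.pyGetD cycles j []))).length : ℕ) : ℤ)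
      = ∑ j ∈ Finset.Ico (i+1) n, pvInd (pvRelL cycles i j) := by
  rw [← List.countP_eq_length_filter,
    show ((i:ℤ)+1) = (((i+1 : ℕ)):ℤ) by push_cast; ring,
    pvCountP_eq_sum, pvBridgeSum]
  refine Finset.sum_congr rfl (fun j hj => ?_)
  simp only [Finset.mem_Ico] at hj
  rw [pvRowPred cycles i j (by omega)]

theorem pvUpperMem (cycles : List (List Int)) (n i k : ℕ) :
    ((k:ℤ) ∈ (PySem.List.pyRange ((i:ℤ)+1) (n:ℤ)).filter (fun j =>
        pvSharesD (PySem.List.pyGetD cycles (i:ℤ) []) (PySem.List.pyGetD cycles j [])))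
      ↔ (i < k ∧ k < n ∧ pvRelL cycles i k = true) := by
  rw [List.mem_filter, PySem.List.mem_pyRange_one]
  constructor
  · rintro ⟨⟨h1, h2⟩, hp⟩
    have hik : i < k := by omega
    have hkn : k < n := by omega
    rw [pvRowPred cycles i k (by omega)] at hp
    exact ⟨hik, hkn, hp⟩
  · rintro ⟨h1, h2, hp⟩
    refine ⟨⟨by push_cast; omega, by push_cast; omega⟩, ?_⟩
    rw [pvRowPred cycles i k (by omega)]
    exact hp

theorem pvEsum (cycles : List (List Int)) (n : ℕ) :
    ((pvUpper cycles (n:ℤ)).map (fun u => (u.length : ℤ))).sum = pvEE cycles n := by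
  unfold pvUpper
  rw [List.map_map]
  simp only [Function.comp_def]
  rw [pvBridgeSum0]
  unfold pvEE
  exact Finset.sum_congr rfl (fun i _ => pvUpperLen cycles n i)

-- the lowdeg counting fold
theorem pvGetD_modify_int (l : List Int) (a : ℕ) (f : Int → Int) (i : ℕ) (hi : i < l.length) :
    (l.modify a f).getD i 0 = if a = i then f (l.getD i 0) else l.getD i 0 := by
  rw [List.getD_eq_getElem?_getD, List.getD_eq_getElem?_getD, List.getElem?_modify,
    List.getElem?_eq_getElem hi]
  by_cases h : a = i <;> simp [h]

theorem pvIncFold (n : ℕ) (L : List ℤ) (hL : ∀ x ∈ L, ∃ a : ℕ, x = (a:ℤ) ∧ a < n) :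
    ∀ ld : List ℤ, ld.length = n → ∀ k : ℕ, k < n →
      (L.foldl (fun ld j => ld.modify j.toNat (fun c => c + 1)) ld).getD k 0
        = ld.getD k 0 + (L.count (k:ℤ) : ℤ) := by
  induction L with
  | nil => intro ld _ k _; simp
  | cons x t ih =>
    intro ld hlen k hk
    obtain ⟨a, rfl, ha⟩ := hL x List.mem_cons_self
    rw [List.foldl_cons,
      ih (fun y hy => hL y (List.mem_cons_of_mem _ hy)) _
        (by rw [List.length_modify]; exact hlen) k hk,
      Int.toNat_natCast,
      pvGetD_modify_int ld a _ k (by omega),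
      List.count_cons]
    by_cases h : a = k
    · subst h
      simp only [if_pos rfl, BEq.rfl, if_true]
      push_cast; ring
    · have hbe : (((a:ℕ):ℤ) == ((k:ℕ):ℤ)) = false := by
        rw [beq_eq_false_iff_ne]
        exact_mod_cast h
      rw [if_neg h, hbe]
      simp

theorem pvUpperEntries (cycles : List (List Int)) (n : ℕ) :
    ∀ x ∈ (pvUpper cycles (n:ℤ)).flatten, ∃ a : ℕ, x = (a:ℤ) ∧ a < n := by
  intro x hx
  rw [List.mem_flatten] at hx
  obtain ⟨row, hrow, hxr⟩ := hx
  unfold pvUpper at hrow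
  rw [List.mem_map] at hrow
  obtain ⟨i, hi, rfl⟩ := hrow
  rw [List.mem_filter, PySem.List.mem_pyRange_one] at hxr
  rw [PySem.List.mem_pyRange_one] at hi
  refine ⟨x.toNat, (Int.toNat_of_nonneg (by omega)).symm, by omega⟩

theorem pvCastSum (l : List ℤ) (f : ℤ → ℕ) :
    (((l.map f).sum : ℕ) : ℤ) = (l.map (fun x => ((f x : ℕ) : ℤ))).sum := by
  induction l with
  | nil => simp
  | cons x t ih => simp [ih]

theorem pvSumIfLt (n k : ℕ) (hk : k ≤ n) (F : ℕ → ℤ) :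
    (∑ i ∈ Finset.Ico 0 n, if i < k then F i else 0) = ∑ i ∈ Finset.Ico 0 k, F i := by
  rw [← Finset.sum_filter]
  have : (Finset.Ico 0 n).filter (fun i => i < k) = Finset.Ico 0 k := by
    ext x; simp [Finset.mem_filter]; omega
  rw [this]

theorem pvLowCount (cycles : List (List Int)) (n k : ℕ) (hk : k < n) :
    (((pvUpper cycles (n:ℤ)).flatten.count ((k:ℕ):ℤ) : ℕ) : ℤ)
      = ∑ i ∈ Finset.Ico 0 k, pvInd (pvRelL cycles i k) := by
  rw [List.count_flatten]
  unfold pvUpper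
  rw [List.map_map, pvCastSum]
  simp only [Function.comp_def]
  rw [pvBridgeSum0]
  rw [← pvSumIfLt n k (le_of_lt hk) (fun i => pvInd (pvRelL cycles i k))]
  refine Finset.sum_congr rfl (fun i _ => ?_)
  by_cases hmem : ((k:ℕ):ℤ) ∈ (PySem.List.pyRange ((i:ℤ)+1) (n:ℤ)).filter (fun j =>
      pvSharesD (PySem.List.pyGetD cycles (i:ℤ) []) (PySem.List.pyGetD cycles j []))
  · obtain ⟨h1, h2, h3⟩ := (pvUpperMem cycles n i k).1 hmem
    rw [List.count_eq_one_of_mem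
      (List.Nodup.filter _ (PySem.List.nodup_pyRange_one _ _)) hmem]
    rw [if_pos h1, h3]
    rfl
  · rw [List.count_eq_zero.2 hmem]
    by_cases h1 : i < k
    · rw [if_pos h1]
      have : pvRelL cycles i k = false := by
        cases hr : pvRelL cycles i k with
        | false => rfl
        | true => exact absurd ((pvUpperMem cycles n i k).2 ⟨h1, hk, hr⟩) hmem
      rw [this]
      rfl
    · rw [if_neg h1]
      rfl

theorem pvLowdegGet (cycles : List (List Int)) (n k : ℕ) (hk : k < n) :
    ((pvUpper cycles (n:ℤ)).foldl (fun ld u =>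
        u.foldl (fun ld j => ld.modify j.toNat (fun c => c + 1)) ld)
        (List.replicate ((n:ℤ)).toNat (0:ℤ))).getD k 0
      = ∑ i ∈ Finset.Ico 0 k, pvInd (pvRelL cycles i k) := by
  rw [← List.foldl_flatten,
    pvIncFold n _ (pvUpperEntries cycles n) _
      (by rw [List.length_replicate, Int.toNat_natCast]) k hk,
    List.getD_replicate _ (by rw [Int.toNat_natCast]; exact hk),
    pvLowCount cycles n k hk, zero_add]

-- row length + lowdeg entry = full degree
theorem pvDegFull (cycles : List (List Int)) (n k : ℕ) (hk : k < n) :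
    (∑ j ∈ Finset.Ico (k+1) n, pvInd (pvRelL cycles k j))
      + (∑ i ∈ Finset.Ico 0 k, pvInd (pvRelL cycles i k))
      = ∑ j ∈ Finset.Ico 0 n, pvInd (pvRelL cycles k j) := by
  rw [pvSplitAt' k (Nat.zero_le k) hk (fun j => pvInd (pvRelL cycles k j)),
    pvRelL_irrefl]
  have : (∑ i ∈ Finset.Ico 0 k, pvInd (pvRelL cycles i k))
      = ∑ i ∈ Finset.Ico 0 k, pvInd (pvRelL cycles k i) :=
    Finset.sum_congr rfl (fun i _ => by rw [pvRelL_symm])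
  rw [this]
  simp [pvInd]
  ring

-- P2 as the cherry sum
theorem pvP2Sum (cycles : List (List Int)) (n : ℕ) :
    ((((PySem.List.pyRange 0 (n:ℤ)).map (fun i =>
        ((PySem.List.pyGetD (pvUpper cycles (n:ℤ)) i []).length : ℤ)
          + PySem.List.pyGetD ((pvUpper cycles (n:ℤ)).foldl (fun ld u =>
              u.foldl (fun ld j => ld.modify j.toNat (fun c => c + 1)) ld)
              (List.replicate ((n:ℤ)).toNat (0:ℤ))) i 0)).map
        (fun d => PySem.Int.floordiv (d * (d - 1)) 2)).sum) = pvCHH cycles n := by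
  rw [List.map_map]
  simp only [Function.comp_def]
  rw [pvBridgeSum0]
  unfold pvCHH
  refine Finset.sum_congr rfl (fun i hi => ?_)
  simp only [Finset.mem_Ico] at hi
  rw [pvUpperGet cycles n i hi.2, pvUpperLen cycles n i,
    PySem.List.pyGetD_natCast, pvLowdegGet cycles n i hi.2,
    pvDegFull cycles n i hi.2]
  exact pvFdiv2 _ _ (pvCherry n (fun a => pvRelL cycles i a)).symm

-- the edge-based triangle count of B
theorem pvTsum (cycles : List (List Int)) (n : ℕ) :
    (PySem.List.pyRange 0 (n:ℤ)).foldl (fun t i =>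
      (PySem.List.pyGetD (pvUpper cycles (n:ℤ)) i []).foldl (fun t j =>
        t + (((PySem.List.pyGetD (pvUpper cycles (n:ℤ)) j []).filter (fun k =>
          PySem.Set.contains (PySem.Set.ofList
            (PySem.List.pyGetD (pvUpper cycles (n:ℤ)) i [])) k)).length : ℤ)) t) 0
      = pvTT cycles n := by
  have h1 := PySem.List.foldl_congr_mem (PySem.List.pyRange 0 (n:ℤ))
    (fun t i => (PySem.List.pyGetD (pvUpper cycles (n:ℤ)) i []).foldl (fun t j => t + (((PySem.List.pyGetD (pvUpper cycles (n:ℤ)) j []).filter (fun k => PySem.Set.contains (PySem.Set.ofList (PySem.List.pyGetD (pvUpper cycles (n:ℤ)) i [])) k)).length : ℤ)) t)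
    (fun t i => t + ((PySem.List.pyGetD (pvUpper cycles (n:ℤ)) i []).map (fun j => (((PySem.List.pyGetD (pvUpper cycles (n:ℤ)) j []).filter (fun k => PySem.Set.contains (PySem.Set.ofList (PySem.List.pyGetD (pvUpper cycles (n:ℤ)) i [])) k)).length : ℤ))).sum)
    (0 : ℤ) (fun t i _ => PySem.List.foldl_add _ _ _)
  rw [h1, PySem.List.foldl_add, zero_add, pvBridgeSum0]
  unfold pvTT
  refine Finset.sum_congr rfl (fun i hi => ?_)
  simp only [Finset.mem_Ico] at hi
  rw [pvUpperGet cycles n i hi.2, pvSumFilter, pvBridgeSumS]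
  have hstep : ∀ j ∈ Finset.Ico (i+1) n,
      (if pvSharesD (PySem.List.pyGetD cycles (i:ℤ) []) (PySem.List.pyGetD cycles (j:ℤ) []) then
        (((PySem.List.pyGetD (pvUpper cycles (n:ℤ)) (j:ℤ) []).filter (fun k =>
          PySem.Set.contains (PySem.Set.ofList
            ((PySem.List.pyRange ((i:ℤ)+1) (n:ℤ)).filter (fun j =>
              pvSharesD (PySem.List.pyGetD cycles (i:ℤ) []) (PySem.List.pyGetD cycles j [])))) k)).length : ℤ)
        else 0)
      = ∑ k ∈ Finset.Ico (j+1) n,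
          pvInd (pvRelL cycles i j && pvRelL cycles i k && pvRelL cycles j k) := by
    intro j hj
    simp only [Finset.mem_Ico] at hj
    rw [pvRowPred cycles i j (by omega)]
    cases hrel : pvRelL cycles i j with
    | false =>
      rw [if_neg (by simp)]
      symm
      refine Finset.sum_eq_zero (fun k _ => ?_)
      simp [pvInd]
    | true =>
      rw [if_pos rfl, pvUpperGet cycles n j hj.2,
        ← List.countP_eq_length_filter, List.countP_filter,
        pvCountP_eq_sum, pvBridgeSumS]
      refine Finset.sum_congr rfl (fun k hk => ?_)
      simp only [Finset.mem_Ico] at hk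
      have hcont : PySem.Set.contains (PySem.Set.ofList
          ((PySem.List.pyRange ((i:ℤ)+1) (n:ℤ)).filter (fun j =>
            pvSharesD (PySem.List.pyGetD cycles (i:ℤ) []) (PySem.List.pyGetD cycles j []))))
          ((k:ℕ):ℤ) = pvRelL cycles i k := by
        cases hr : pvRelL cycles i k with
        | true =>
          rw [(PySem.Set.contains_iff _ _).2 ((PySem.Set.mem_ofList _ _).2
            ((pvUpperMem cycles n i k).2 ⟨by omega, by omega, hr⟩))]
        | false =>
          rw [Bool.eq_false_iff]
          intro hc
          have hm := (PySem.Set.mem_ofList _ _).1 ((PySem.Set.contains_iff _ _).1 hc)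
          obtain ⟨-, -, h3⟩ := (pvUpperMem cycles n i k).1 hm
          rw [hr] at h3
          exact Bool.false_ne_true h3
      rw [hcont, pvRowPred cycles j k (by omega), Bool.true_and]
  rw [Finset.sum_congr rfl hstep]


theorem pvC2fd (n : ℕ) : PySem.Int.floordiv ((n:ℤ) * ((n:ℤ) - 1)) 2 = pvC2 n :=
  pvFdiv2 _ _ (pvC2_id n).symm

theorem pvC3fd (n : ℕ) :
    PySem.Int.floordiv ((n:ℤ) * ((n:ℤ) - 1) * ((n:ℤ) - 2)) 6 = pvC3 n :=
  pvFdiv6 _ _ (pvC3_id n).symm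

theorem pvA2eq (cycles : List (List Int)) (n : ℕ) :
    ∑ i ∈ Finset.Ico 0 n, ∑ j ∈ Finset.Ico (i+1) n, pvInd (!(pvRelL cycles i j))
      = pvC2 n - pvEE cycles n := by
  unfold pvC2 pvEE
  rw [← Finset.sum_sub_distrib]
  refine Finset.sum_congr rfl (fun i _ => ?_)
  rw [← Finset.sum_sub_distrib]
  exact Finset.sum_congr rfl (fun j _ => pvInd_not _)

theorem pvA3eq (cycles : List (List Int)) (n : ℕ) :
    ∑ i ∈ Finset.Ico 0 n, ∑ j ∈ Finset.Ico (i+1) n, ∑ k ∈ Finset.Ico (j+1) n,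
        pvInd (!(pvRelL cycles i j) && !(pvRelL cycles i k) && !(pvRelL cycles j k))
      = pvC3 n - pvEE cycles n * ((n:ℤ) - 2) + pvCHH cycles n - pvTT cycles n := by
  unfold pvEE pvCHH pvTT
  exact pvMain n (pvRelL cycles) (pvRelL_symm cycles) (pvRelL_irrefl cycles)

theorem pvTrimChain (mz a2 a3 : ℤ) (hm : mz ≠ 0) :
    pvTrim [1, mz, a2, a3]
      = if a3 != 0 then [1, mz, a2, a3]
        else if a2 != 0 then [1, mz, a2] else [1, mz] := by
  by_cases h3 : a3 = 0
  · subst h3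
    rw [pvTrim, if_pos (by refine ⟨by norm_num, ?_⟩; rfl)]
    rw [if_neg (by simp)]
    show pvTrim [1, mz, a2] = _
    by_cases h2 : a2 = 0
    · subst h2
      rw [pvTrim, if_pos (by refine ⟨by norm_num, ?_⟩; rfl)]
      rw [if_neg (by simp)]
      show pvTrim [1, mz] = _
      rw [pvTrim, if_neg (by rintro ⟨-, h⟩; simp at h; exact hm h)]
    · rw [pvTrim, if_neg (by rintro ⟨-, h⟩; simp at h; exact h2 h)]
      rw [if_pos (by simpa using h2)]
  · rw [pvTrim, if_neg (by rintro ⟨-, h⟩; simp at h; exact h3 h)]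
    rw [if_pos (by simpa using h3)]

theorem pvABeq (cycles : List (List Int)) :
    compute_independence_poly cycles = compute_independence_poly_alt cycles := by
  cases hn : cycles.length with
  | zero =>
    have hc : cycles = [] := List.length_eq_zero_iff.1 hn
    subst hc; rfl
  | succ n' =>
    have h0 : ((cycles.length : ℤ) == 0) = false := by
      rw [hn, beq_eq_false_iff_ne]
      push_cast; omega
    unfold compute_independence_poly compute_independence_poly_alt
    simp only [h0, Bool.false_eq_true, if_false, hn]
    have hchar : ∀ i j : ℕ, i < n' + 1 → j < n' + 1 →
        pvMget (pvConflict cycles ((n' + 1 : ℕ):ℤ)) (i:ℤ) (j:ℤ) = pvRelL cycles i j :=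
      fun i j hi hj => pvConflictChar cycles (n' + 1) i j hi hj
    rw [pvAlpha2A cycles _ (n' + 1) hchar, pvAlpha3A cycles _ (n' + 1) hchar]
    rw [pvA2eq, pvA3eq]
    rw [pvEsum, pvC2fd, pvC3fd, pvP2Sum, pvTsum]
    exact pvTrimChain _ _ _ (by push_cast; omega)

-- ===== VERDICT (by name: the statement is the Claim_ definition above) =====
theorem compute_independence_poly_spec : Claim_equal_compute_independence_poly := by
  intro cycles _
  unfold Spec_compute_independence_poly
  exact pvABeq cycles
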